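-- pv_equiv track=rewrite | github.com/maxnelso/algorithms_competitions | top_coder/SRM 669/LiveConcert.py | maxHappiness
-- ===== SOURCE A (Python) =====
-- def maxHappiness(h, s):
--   best = {}
--   for i in range(len(s)):
--     if s[i] not in best:
--       best[s[i]] = h[i]
--     else:
--       best[s[i]] = max(best[s[i]], h[i])
--   return sum(best.values())
-- ===== SOURCE B (Python) =====
-- def maxHappiness(h, s):
--     # Sort the (singer, happiness) pairs by singer, then one scan that keeps the
--     # running max of the current group and flushes it when the singer changes.
--     pairs = sorted(zip(s, h), key=lambda p: p[0])
--     total = 0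
--     cur_m = None
--     for k, w in pairs:
--         if cur_m is None:
--             cur_m = (k, w)
--         elif k == cur_m[0]:
--             cur_m = (cur_m[0], max(cur_m[1], w))
--         else:
--             total += cur_m[1]
--             cur_m = (k, w)
--     if cur_m is not None:
--         total += cur_m[1]
--     return total
-- ===== Notes on version B (the rewrite author's own statement) =====
-- stated objective: alternative
-- what changed: Replaces the dict of per-singer running maxima (indexed loop over range(len(s)) + sum of dict values) with sort-by-singer of the zipped pairs followed by a single group scan that flushes each group's running max when the singer changes.
import Mathlib
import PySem

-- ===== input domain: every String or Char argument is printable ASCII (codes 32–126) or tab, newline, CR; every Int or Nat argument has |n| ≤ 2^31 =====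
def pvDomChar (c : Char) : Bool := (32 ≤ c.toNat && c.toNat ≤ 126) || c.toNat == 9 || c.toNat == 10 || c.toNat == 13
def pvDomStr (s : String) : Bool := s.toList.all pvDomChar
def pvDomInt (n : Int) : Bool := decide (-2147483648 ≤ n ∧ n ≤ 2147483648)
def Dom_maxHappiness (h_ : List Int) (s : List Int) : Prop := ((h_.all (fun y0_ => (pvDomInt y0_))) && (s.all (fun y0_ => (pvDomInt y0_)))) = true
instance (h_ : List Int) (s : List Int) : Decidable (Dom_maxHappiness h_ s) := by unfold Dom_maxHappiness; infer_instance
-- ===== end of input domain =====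

-- B is an alternative formulation: instead of A's dict of per-singer running maxima,
-- it sorts the zipped (singer, happiness) pairs by singer and makes one group scan,
-- flushing each group's running max when the singer changes.

-- ===== PORT A =====
-- Python's best[s[i]] lookup in the else-branch is always present; getD is exact there.
def maxHappiness (h_ : List Int) (s : List Int) : Int :=
  ((PySem.List.pyRange 0 (PySem.List.len s) 1).foldl
    (fun best i =>
      let key := (PySem.List.pyGet? s i).getD 0
      let hv := (PySem.List.pyGet? h_ i).getD 0
      if best.contains key = false then best.insert key hv
      else best.insert key (max (best.getD key 0) hv))
    PySem.Dict.empty).values.sum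

-- ===== PORT B =====
def maxHappiness_alt (h_ : List Int) (s : List Int) : Int :=
  let pairs := PySem.List.sorted (s.zip h_) (fun p => p.1) false
  let st := pairs.foldl
    (fun (st : Int × Option (Int × Int)) (p : Int × Int) =>
      match st.2 with
      | none => (st.1, some (p.1, p.2))
      | some cm =>
        if p.1 == cm.1 then (st.1, some (cm.1, max cm.2 p.2))
        else (st.1 + cm.2, some (p.1, p.2)))
    ((0 : Int), (none : Option (Int × Int)))
  match st.2 with
  | none => st.1
  | some cm => st.1 + cm.2

-- ===== PRECONDITION & SPEC =====
-- Pre_ excludes exactly the inputs where A raises IndexError (h_ shorter than s).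
def Pre_maxHappiness (h_ : List Int) (s : List Int) : Prop := s.length ≤ h_.length
instance (h_ : List Int) (s : List Int) : Decidable (Pre_maxHappiness h_ s) := by unfold Pre_maxHappiness; infer_instance
def pvWitness_maxHappiness : List Int × List Int := ([3, 1, 4], [7, 7, 9])

def Spec_maxHappiness (h_ : List Int) (s : List Int) (out : Int) : Prop := out = maxHappiness_alt h_ s
instance (h_ : List Int) (s : List Int) (out : Int) : Decidable (Spec_maxHappiness h_ s out) := by unfold Spec_maxHappiness; infer_instance

-- ===== CLAIM (what is proved, stated in full; the proofs are below) =====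
def Claim_equal_maxHappiness : Prop := ∀ (h_ : List Int) (s : List Int), Dom_maxHappiness h_ s → Pre_maxHappiness h_ s → Spec_maxHappiness h_ s (maxHappiness h_ s)

-- ===== LEMMAS AND PROOFS =====

-- A's loop step, on a (singer, happiness) pair.
def pstep (d : PySem.Dict Int Int) (p : Int × Int) : PySem.Dict Int Int :=
  if d.contains p.1 = false then d.insert p.1 p.2
  else d.insert p.1 (max (d.getD p.1 0) p.2)

lemma bridge (F : PySem.Dict Int Int → Int → Int → PySem.Dict Int Int) :
    ∀ (s h : List Int) (d : PySem.Dict Int Int), s.length ≤ h.length →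
    (List.range s.length).foldl (fun b k => F b (s[k]?.getD 0) (h[k]?.getD 0)) d
    = (s.zip h).foldl (fun b p => F b p.1 p.2) d := by
  intro s
  induction s with
  | nil => intro h d _; simp
  | cons x s' ih =>
    intro h d hle
    cases h with
    | nil => simp at hle
    | cons y h' =>
      simp only [List.length_cons, List.range_succ_eq_map, List.foldl_cons, List.foldl_map,
        List.getElem?_cons_succ, List.getElem?_cons_zero, Option.getD_some, List.zip_cons_cons]
      exact ih h' (F d x y) (by simpa using hle)

lemma A_eq_zipfold (h_ s : List Int) (hle : s.length ≤ h_.length) :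
    maxHappiness h_ s = ((s.zip h_).foldl pstep PySem.Dict.empty).values.sum := by
  unfold maxHappiness
  rw [show PySem.List.len s = ((s.length : Nat) : Int) from rfl, PySem.List.pyRange_zero_nat]
  rw [List.foldl_map]
  simp only [PySem.List.pyGet?_natCast]
  rw [bridge (fun b k v => if b.contains k = false then b.insert k v
        else b.insert k (max (b.getD k 0) v)) s h_ PySem.Dict.empty hle]
  rfl

lemma pstep_eq_insert (d : PySem.Dict Int Int) (p : Int × Int) :
    pstep d p = d.insert p.1 (if d.contains p.1 = false then p.2 else max (d.getD p.1 0) p.2) := by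
  unfold pstep; split <;> simp_all

lemma get?_fold (ps : List (Int × Int)) (d : PySem.Dict Int Int) (k : Int) :
    (ps.foldl pstep d).get? k =
      ((ps.filter (fun p => p.1 == k)).map (·.2)).foldl
        (fun o w => some (o.elim w (fun b => max b w))) (d.get? k) := by
  induction ps generalizing d with
  | nil => simp
  | cons p ps ih =>
    rw [List.foldl_cons, ih]
    by_cases hk : p.1 = k
    · have hfil : (p :: ps).filter (fun q => q.1 == k) = p :: ps.filter (fun q => q.1 == k) := by
        simp [hk]
      rw [hfil, List.map_cons, List.foldl_cons]
      congr 1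
      rw [pstep_eq_insert, hk, PySem.Dict.get?_insert_self]
      rw [PySem.Dict.contains_eq_isSome_get?]
      cases hg : d.get? k <;> simp [hg, PySem.Dict.getD_eq_get?_getD]
    · have hfil : (p :: ps).filter (fun q => q.1 == k) = ps.filter (fun q => q.1 == k) := by
        simp [hk]
      rw [hfil]
      congr 1
      rw [pstep_eq_insert, PySem.Dict.get?_insert_of_ne _ _ (fun h => hk h.symm)]

lemma keys_fold (ps : List (Int × Int)) (d : PySem.Dict Int Int) :
    (ps.foldl pstep d).keys = PySem.Set.update d.keys (ps.map (·.1)) := by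
  have h : ps.foldl pstep d = ps.foldl (fun d p => d.insert p.1
      (if d.contains p.1 = false then p.2 else max (d.getD p.1 0) p.2)) d := by
    congr 1; funext d p; exact pstep_eq_insert d p
  rw [h, PySem.Dict.keys_foldl_insert_key]

lemma nodup_keys_fold (ps : List (Int × Int)) (d : PySem.Dict Int Int) (hd : d.keys.Nodup) :
    (ps.foldl pstep d).keys.Nodup := by
  have h : ps.foldl pstep d = ps.foldl (fun d p => d.insert p.1
      (if d.contains p.1 = false then p.2 else max (d.getD p.1 0) p.2)) d := by
    congr 1; funext d p; exact pstep_eq_insert d p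
  rw [h]; exact PySem.Dict.nodup_keys_foldl_insert_key _ _ _ _ hd

-- max-fold over options from some
lemma optfold_some (ws : List Int) (m : Int) :
    ws.foldl (fun o w => some (o.elim w (fun b => max b w))) (some m) = some (ws.foldl max m) := by
  induction ws generalizing m with
  | nil => rfl
  | cons w ws ih => simp [ih]

-- dedup commutes with filtering a key away
lemma ofList_filter_ne (l : List Int) (x : Int) :
    PySem.Set.ofList (l.filter (fun y => !(y == x))) = (PySem.Set.ofList l).discard x := by
  induction l with
  | nil => rfl
  | cons a l ih =>
    by_cases hax : a = x
    · subst hax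
      have h1 : (a :: l).filter (fun y => !(y == a)) = l.filter (fun y => !(y == a)) := by simp
      rw [h1, ih, PySem.Set.ofList_cons]
      simp [PySem.Set.discard, List.filter_filter]
    · have h1 : (a :: l).filter (fun y => !(y == x)) = a :: l.filter (fun y => !(y == x)) := by
        simp [hax]
      rw [h1, PySem.Set.ofList_cons, ih, PySem.Set.ofList_cons]
      simp [PySem.Set.discard, hax, List.filter_filter]
      congr 1
      simp [Bool.and_comm]

lemma map_fst_filter (l : List (Int × Int)) (x : Int) :
    (l.filter (fun p => !(p.1 == x))).map (·.1) = (l.map (·.1)).filter (fun y => !(y == x)) := by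
  induction l with
  | nil => rfl
  | cons a l ih => by_cases h : a.1 = x <;> simp [h, ih]

lemma keys_fold_empty (ps : List (Int × Int)) :
    (ps.foldl pstep PySem.Dict.empty).keys = PySem.Set.ofList (ps.map (·.1)) := by
  rw [keys_fold, show (PySem.Dict.empty : PySem.Dict Int Int).keys = [] from rfl,
    PySem.Set.update_nil_left]

lemma sum_group (x v : Int) (rest : List (Int × Int)) :
    (((x, v) :: rest).foldl pstep PySem.Dict.empty).values.sum =
      ((rest.filter (fun p => p.1 == x)).map (·.2)).foldl (fun m w => max m w) v
      + ((rest.filter (fun p => !(p.1 == x))).foldl pstep PySem.Dict.empty).values.sum := by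
  set D := ((x, v) :: rest).foldl pstep PySem.Dict.empty with hD
  set others := rest.filter (fun p => !(p.1 == x)) with hothers
  set D' := others.foldl pstep PySem.Dict.empty with hD'
  have hndE : (PySem.Dict.empty : PySem.Dict Int Int).keys.Nodup := List.nodup_nil
  have hnd : D.keys.Nodup := nodup_keys_fold _ _ hndE
  have hnd' : D'.keys.Nodup := nodup_keys_fold _ _ hndE
  have hkeys : D.keys = x :: (PySem.Set.ofList (rest.map (·.1))).discard x := by
    rw [hD, keys_fold_empty, List.map_cons, PySem.Set.ofList_cons]
  have hkeys' : D'.keys = (PySem.Set.ofList (rest.map (·.1))).discard x := by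
    rw [hD', keys_fold_empty, hothers, map_fst_filter, ofList_filter_ne]
  have hgx : D.getD x 0 = ((rest.filter (fun p => p.1 == x)).map (·.2)).foldl (fun m w => max m w) v := by
    rw [PySem.Dict.getD_eq_get?_getD, hD, get?_fold]
    have hfil : ((x, v) :: rest).filter (fun p => p.1 == x) = (x, v) :: rest.filter (fun p => p.1 == x) := by
      simp
    rw [hfil, List.map_cons, List.foldl_cons, PySem.Dict.get?_empty]
    simp only [Option.elim_none]
    rw [optfold_some]
    rfl
  have hoth : ∀ k ∈ D'.keys, D.getD k 0 = D'.getD k 0 := by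
    intro k hk
    have hkx : k ≠ x := by
      rw [hkeys'] at hk
      exact ((PySem.Set.mem_discard _ _ _).mp hk).2
    rw [PySem.Dict.getD_eq_get?_getD, PySem.Dict.getD_eq_get?_getD, hD, hD',
      get?_fold, get?_fold]
    congr 2
    have h1 : ((x, v) :: rest).filter (fun p => p.1 == k) = rest.filter (fun p => p.1 == k) := by
      simp [Ne.symm hkx]
    have h2 : others.filter (fun p => p.1 == k) = rest.filter (fun p => p.1 == k) := by
      rw [hothers, List.filter_filter]
      apply List.filter_congr
      intro p _
      by_cases hp : p.1 = k
      · simp [hp, hkx]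
      · simp [hp]
    rw [h1, h2]
  calc D.values.sum
      = (D.keys.map (fun k => D.getD k 0)).sum := by rw [PySem.Dict.values_eq_map_keys D hnd 0]
    _ = D.getD x 0 + ((D'.keys).map (fun k => D.getD k 0)).sum := by
          rw [hkeys, List.map_cons, List.sum_cons, ← hkeys']
    _ = D.getD x 0 + ((D'.keys).map (fun k => D'.getD k 0)).sum := by
          rw [List.map_congr_left hoth]
    _ = _ := by rw [hgx, PySem.Dict.values_eq_map_keys D' hnd' 0]

def bstep (st : Int × Option (Int × Int)) (p : Int × Int) : Int × Option (Int × Int) :=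
  match st.2 with
  | none => (st.1, some (p.1, p.2))
  | some cm =>
    if p.1 == cm.1 then (st.1, some (cm.1, max cm.2 p.2))
    else (st.1 + cm.2, some (p.1, p.2))

def bfin (st : Int × Option (Int × Int)) : Int :=
  match st.2 with
  | none => st.1
  | some cm => st.1 + cm.2

lemma optfold_perm {l1 l2 : List Int} (hp : l1.Perm l2) (o : Option Int) :
    l1.foldl (fun o w => some (o.elim w (fun b => max b w))) o
      = l2.foldl (fun o w => some (o.elim w (fun b => max b w))) o := by
  refine @List.Perm.foldl_eq _ _ _ _ _ ⟨fun b a1 a2 => ?_⟩ hp o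
  cases b <;> simp [max_comm, max_left_comm]

lemma get?_fold_perm {qs ps : List (Int × Int)} (hp : qs.Perm ps) (k : Int) :
    (qs.foldl pstep PySem.Dict.empty).get? k = (ps.foldl pstep PySem.Dict.empty).get? k := by
  rw [get?_fold, get?_fold]
  exact optfold_perm ((hp.filter _).map _) _

lemma F_perm {qs ps : List (Int × Int)} (hp : qs.Perm ps) :
    (qs.foldl pstep PySem.Dict.empty).values.sum = (ps.foldl pstep PySem.Dict.empty).values.sum := by
  set Dq := qs.foldl pstep PySem.Dict.empty with hDq
  set Dp := ps.foldl pstep PySem.Dict.empty with hDp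
  have hndE : (PySem.Dict.empty : PySem.Dict Int Int).keys.Nodup := List.nodup_nil
  have hndq : Dq.keys.Nodup := nodup_keys_fold _ _ hndE
  have hndp : Dp.keys.Nodup := nodup_keys_fold _ _ hndE
  have hK : Dq.keys.Perm Dp.keys := by
    refine (List.perm_ext_iff_of_nodup hndq hndp).mpr ?_
    intro a
    rw [hDq, hDp, keys_fold_empty, keys_fold_empty, PySem.Set.mem_ofList, PySem.Set.mem_ofList]
    exact ⟨fun h => (hp.map (·.1)).mem_iff.mp h, fun h => (hp.map (·.1)).mem_iff.mpr h⟩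
  have hgd : ∀ k : Int, Dq.getD k 0 = Dp.getD k 0 := by
    intro k
    rw [PySem.Dict.getD_eq_get?_getD, PySem.Dict.getD_eq_get?_getD, hDq, hDp, get?_fold_perm hp]
  rw [PySem.Dict.values_eq_map_keys Dq hndq 0, PySem.Dict.values_eq_map_keys Dp hndp 0]
  have : Dq.keys.map (fun k => Dq.getD k 0) = Dq.keys.map (fun k => Dp.getD k 0) := by
    exact List.map_congr_left (fun k _ => hgd k)
  rw [this]
  exact (hK.map _).sum_eq

lemma scan_go (qs : List (Int × Int)) (total cur m : Int)
    (hs : qs.Pairwise (fun a b => a.1 ≤ b.1)) (hge : ∀ p ∈ qs, cur ≤ p.1) :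
    bfin (qs.foldl bstep (total, some (cur, m))) =
      total + ((qs.filter (fun p => p.1 == cur)).map (·.2)).foldl (fun m w => max m w) m
        + ((qs.filter (fun p => !(p.1 == cur))).foldl pstep PySem.Dict.empty).values.sum := by
  induction qs generalizing total cur m with
  | nil =>
    simp [bfin, List.foldl_nil,
      show (PySem.Dict.empty : PySem.Dict Int Int).values.sum = 0 from rfl]
  | cons q rest ih =>
    rcases List.pairwise_cons.mp hs with ⟨hq, hrest⟩
    by_cases hqc : q.1 = cur
    · have hstep : bstep (total, some (cur, m)) q = (total, some (cur, max m q.2)) := by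
        simp [bstep, hqc]
      rw [List.foldl_cons, hstep, ih total cur (max m q.2) hrest
        (fun p hp => hge p (List.mem_cons_of_mem _ hp))]
      have h1 : (q :: rest).filter (fun p => p.1 == cur) = q :: rest.filter (fun p => p.1 == cur) := by
        simp [hqc]
      have h2 : (q :: rest).filter (fun p => !(p.1 == cur)) = rest.filter (fun p => !(p.1 == cur)) := by
        simp [hqc]
      rw [h1, h2, List.map_cons, List.foldl_cons]
    · have hlt : cur < q.1 := lt_of_le_of_ne (hge q List.mem_cons_self) (fun h => hqc h.symm)
      have hstep : bstep (total, some (cur, m)) q = (total + m, some (q.1, q.2)) := by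
        simp [bstep, hqc]
      rw [List.foldl_cons, hstep, ih (total + m) q.1 q.2 hrest hq]
      have hnone : rest.filter (fun p => p.1 == cur) = [] := by
        apply List.filter_eq_nil_iff.mpr
        intro p hp
        simp only [beq_iff_eq]
        exact fun h => absurd (h ▸ hq p hp) (not_le.mpr hlt)
      have h1 : (q :: rest).filter (fun p => p.1 == cur) = [] := by
        simp [hnone, hqc]
      have h2 : (q :: rest).filter (fun p => !(p.1 == cur)) = q :: rest := by
        rw [List.filter_cons_of_pos (by simp [hqc]), List.filter_eq_self.mpr]
        intro p hp
        simp only [Bool.not_eq_eq_eq_not, Bool.not_true, beq_eq_false_iff_ne]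
        exact fun h => absurd (h ▸ hq p hp) (not_le.mpr hlt)
      rw [h1, h2]
      have hsg := sum_group q.1 q.2 rest
      simp only [List.map_nil, List.foldl_nil]
      rw [show ((q.1, q.2) : Int × Int) = q from rfl] at hsg
      rw [hsg]
      ring

lemma B_eq (h_ s : List Int) :
    maxHappiness_alt h_ s =
      ((PySem.List.sorted (s.zip h_) (fun p => p.1) false).foldl pstep PySem.Dict.empty).values.sum := by
  show bfin ((PySem.List.sorted (s.zip h_) (fun p => p.1) false).foldl bstep (0, none)) = _
  have hsort : (PySem.List.sorted (s.zip h_) (fun p => p.1) false).Pairwise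
      (fun a b : Int × Int => a.1 ≤ b.1) := PySem.List.sorted_pairwise _ _
  cases hp : PySem.List.sorted (s.zip h_) (fun p => p.1) false with
  | nil =>
    simp [bfin, List.foldl_nil,
      show (PySem.Dict.empty : PySem.Dict Int Int).values.sum = 0 from rfl]
  | cons q rest =>
    rw [hp] at hsort
    rcases List.pairwise_cons.mp hsort with ⟨hq, hrest⟩
    rw [List.foldl_cons, show bstep (0, none) q = (0, some (q.1, q.2)) from rfl,
      scan_go rest 0 q.1 q.2 hrest hq]
    have hsg := sum_group q.1 q.2 rest
    rw [show ((q.1, q.2) : Int × Int) = q from rfl] at hsg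
    rw [hsg]
    ring

-- ===== VERDICT (by name: the statement is the Claim_ definition above) =====
theorem maxHappiness_spec : Claim_equal_maxHappiness := by
  intro h_ s _ hpre
  unfold Spec_maxHappiness
  rw [A_eq_zipfold h_ s hpre, B_eq]
  exact (F_perm (PySem.List.sorted_perm _ _ _)).symm
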